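-- pv_equiv track=rewrite | github.com/CSMYang/CSC108 | csc108a2/cipher_functions.py | is_valid_deck
-- ===== SOURCE A (Python) =====
-- from typing import List, TextIO
--
-- def is_valid_deck(deck: List[int]) -> bool:
--     """Return whether the deck provided is a valid deck.
--
--     >>> is_valid_deck([1, 2, 3, 4, 5])
--     True
--     >>> is_valid_deck(['a', 'b', 2, 4, 7]
--     False
--     """
--     new_list = []
--     n = len(deck)
--     for card in deck:
--         if type(card) != int:
--             return False
--         elif not 1 <= card <= n:
--             return False
--         elif int(card) in new_list:
--             return False
--         new_list.append(int(card))
--     return True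
-- ===== SOURCE B (Python) =====
-- def is_valid_deck(deck):
--     """Return whether the deck provided is a valid deck."""
--     for card in deck:
--         if type(card) != int:
--             return False
--     return sorted(deck) == list(range(1, len(deck) + 1))
-- ===== Notes on version B (the rewrite author's own statement) =====
-- stated objective: simpler
-- what changed: Replaces the incremental seen-list membership tracking (quadratic scan of an accumulator with per-card bound checks) by canonicalize-then-compare: after the type scan, sorted(deck) == list(range(1, len(deck)+1)).
import Mathlib
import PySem

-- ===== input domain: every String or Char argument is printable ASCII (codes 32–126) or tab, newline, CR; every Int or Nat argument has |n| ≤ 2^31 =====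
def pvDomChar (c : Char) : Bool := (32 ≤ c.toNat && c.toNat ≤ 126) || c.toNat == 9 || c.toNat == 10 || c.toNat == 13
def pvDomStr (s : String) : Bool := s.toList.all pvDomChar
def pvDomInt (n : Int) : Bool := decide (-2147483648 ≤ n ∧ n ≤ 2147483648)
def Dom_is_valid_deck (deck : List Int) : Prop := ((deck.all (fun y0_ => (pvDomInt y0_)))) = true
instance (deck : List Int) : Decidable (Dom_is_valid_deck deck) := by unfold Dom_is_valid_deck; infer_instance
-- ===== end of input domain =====

-- B replaces A's incremental seen-list membership tracking by canonicalize-then-compare: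
-- sorted(deck) == list(range(1, len(deck)+1)) (objective: simpler).
-- Under the type convention deck : List Int, Python's 'type(card) != int' test is vacuously
-- false in both programs; both ports carry it as-is (a branch that can never fire is omitted
-- after a comment at the spot).

-- ===== PORT A =====
-- the loop of A: 'new_list' accumulator, one card at a time
def isValidDeckGo (n : Int) (new_list : List Int) : List Int → Bool
  | [] => true
  | card :: rest =>
    -- 'if type(card) != int: return False' — vacuous for Int elements
    if ¬ (1 ≤ card ∧ card ≤ n) then false
    else if card ∈ new_list then false
    else isValidDeckGo n (new_list ++ [card]) rest

def is_valid_deck (deck : List Int) : Bool :=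
  isValidDeckGo (deck.length : Int) [] deck

-- ===== PORT B =====
def is_valid_deck_alt (deck : List Int) : Bool :=
  -- the type-scan loop of Source B is vacuous for Int elements (see header comment)
  decide (PySem.List.sorted deck (fun x => x) false
            = PySem.List.pyRange 1 ((deck.length : Int) + 1) 1)

-- ===== PRECONDITION & SPEC =====
def Spec_is_valid_deck (deck : List Int) (out : Bool) : Prop := out = is_valid_deck_alt deck
instance (deck : List Int) (out : Bool) : Decidable (Spec_is_valid_deck deck out) := by unfold Spec_is_valid_deck; infer_instance

-- ===== CLAIM (what is proved, stated in full; the proofs are below) =====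
def Claim_equal_is_valid_deck : Prop := ∀ (deck : List Int), Dom_is_valid_deck deck → Spec_is_valid_deck deck (is_valid_deck deck)

-- ===== LEMMAS AND PROOFS =====

-- A's loop returns true iff the remaining cards are in range, pairwise distinct,
-- and disjoint from the already-seen accumulator.
theorem isValidDeckGo_eq_true_iff (n : Int) (rest : List Int) :
    ∀ new_list, isValidDeckGo n new_list rest = true ↔
      rest.Nodup ∧ ∀ c ∈ rest, (1 ≤ c ∧ c ≤ n) ∧ c ∉ new_list := by
  induction rest with
  | nil => intro new_list; simp [isValidDeckGo]
  | cons card rest ih =>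
    intro new_list
    simp only [isValidDeckGo]
    by_cases h1 : 1 ≤ card ∧ card ≤ n
    · rw [if_neg (not_not.mpr h1)]
      by_cases h2 : card ∈ new_list
      · rw [if_pos h2]
        simp only [Bool.false_eq_true, false_iff]
        rintro ⟨-, hall⟩
        exact (hall card (by simp)).2 h2
      · rw [if_neg h2, ih]
        constructor
        · rintro ⟨hnd, hall⟩
          refine ⟨List.nodup_cons.mpr ⟨?_, hnd⟩, ?_⟩
          · intro hc
            exact (hall card hc).2 (by simp)
          · intro c hc
            rcases List.mem_cons.mp hc with rfl | hc
            · exact ⟨h1, h2⟩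
            · have h3 := hall c hc
              refine ⟨h3.1, ?_⟩
              intro hmem
              exact h3.2 (by simp [hmem])
        · rintro ⟨hnd, hall⟩
          have hnd' := List.nodup_cons.mp hnd
          refine ⟨hnd'.2, ?_⟩
          intro c hc
          have h3 := hall c (by simp [hc])
          refine ⟨h3.1, ?_⟩
          simp only [List.mem_append, List.mem_singleton, not_or]
          exact ⟨h3.2, fun hce => hnd'.1 (hce ▸ hc)⟩
    · rw [if_pos h1]
      simp only [Bool.false_eq_true, false_iff]
      rintro ⟨-, hall⟩
      exact h1 (hall card (by simp)).1

-- characterisation of A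
theorem is_valid_deck_eq_true_iff (deck : List Int) :
    is_valid_deck deck = true ↔
      deck.Nodup ∧ ∀ c ∈ deck, 1 ≤ c ∧ c ≤ (deck.length : Int) := by
  rw [is_valid_deck, isValidDeckGo_eq_true_iff]
  simp

-- nodup + in-range lists of length n are exactly the permutations of [1..n] (pigeonhole)
theorem perm_range_iff (deck : List Int) :
    deck.Perm (PySem.List.pyRange 1 ((deck.length : Int) + 1) 1) ↔
      deck.Nodup ∧ ∀ c ∈ deck, 1 ≤ c ∧ c ≤ (deck.length : Int) := by
  constructor
  · intro hp
    refine ⟨hp.symm.nodup (PySem.List.nodup_pyRange_one 1 _), fun c hc => ?_⟩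
    have := hp.mem_iff.mp hc
    rw [PySem.List.mem_pyRange_one] at this
    omega
  · rintro ⟨hnd, hall⟩
    have hsub : deck.toFinset ⊆ Finset.Icc (1 : Int) (deck.length : Int) := by
      intro c hc
      rw [List.mem_toFinset] at hc
      have := hall c hc
      simpa [Finset.mem_Icc] using this
    have hcard : (Finset.Icc (1 : Int) (deck.length : Int)).card ≤ deck.toFinset.card := by
      rw [List.toFinset_card_of_nodup hnd, Int.card_Icc]
      omega
    have heq := Finset.eq_of_subset_of_card_le hsub hcard
    rw [List.perm_ext_iff_of_nodup hnd (PySem.List.nodup_pyRange_one 1 _)]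
    intro a
    rw [PySem.List.mem_pyRange_one, ← List.mem_toFinset, heq, Finset.mem_Icc]
    omega

-- characterisation of B
theorem is_valid_deck_alt_eq_true_iff (deck : List Int) :
    is_valid_deck_alt deck = true ↔
      deck.Perm (PySem.List.pyRange 1 ((deck.length : Int) + 1) 1) := by
  rw [is_valid_deck_alt, decide_eq_true_iff]
  constructor
  · intro h
    exact h ▸ (PySem.List.sorted_perm deck (fun x => x) false).symm
  · intro hp
    exact PySem.List.sorted_eq_of_perm_of_pairwise_lt _ _ _ hp.symm
      (PySem.List.pairwise_lt_pyRange_one 1 _)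

-- ===== VERDICT (by name: the statement is the Claim_ definition above) =====
theorem is_valid_deck_spec : Claim_equal_is_valid_deck := by
  intro deck _
  unfold Spec_is_valid_deck
  rw [Bool.eq_iff_iff, is_valid_deck_eq_true_iff, is_valid_deck_alt_eq_true_iff,
    perm_range_iff]
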